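-- pv_equiv track=rewrite | github.com/vovencij/aoc | 2023/12/1.py | get_arrangement
-- ===== SOURCE A (Python) =====
-- def get_arrangement(layout):
--     cur_group = 0
--     res = []
--     for _i in range(0, 22):
--         cur_mask = 2 ** _i
--         cur = layout & cur_mask
--         if cur > 0:
--             cur_group += 1
--         elif cur_group > 0:
--             res.append(cur_group)
--             cur_group = 0
--     return res
-- ===== SOURCE B (Python) =====
-- def get_arrangement(layout):
--     s = ''.join('1' if (layout & 2 ** i) > 0 else '0' for i in range(22))
--     return [len(p) for p in s.split('0')[:-1] if p]
-- ===== Notes on version B (the rewrite author's own statement) =====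
-- stated objective: idiomatic
-- what changed: Replaces the manual run-length accumulator loop with building the bit string of the low bits and splitting it on '0': pieces before the last are exactly the terminated runs of 1s, so the result is their lengths.
import Mathlib
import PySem

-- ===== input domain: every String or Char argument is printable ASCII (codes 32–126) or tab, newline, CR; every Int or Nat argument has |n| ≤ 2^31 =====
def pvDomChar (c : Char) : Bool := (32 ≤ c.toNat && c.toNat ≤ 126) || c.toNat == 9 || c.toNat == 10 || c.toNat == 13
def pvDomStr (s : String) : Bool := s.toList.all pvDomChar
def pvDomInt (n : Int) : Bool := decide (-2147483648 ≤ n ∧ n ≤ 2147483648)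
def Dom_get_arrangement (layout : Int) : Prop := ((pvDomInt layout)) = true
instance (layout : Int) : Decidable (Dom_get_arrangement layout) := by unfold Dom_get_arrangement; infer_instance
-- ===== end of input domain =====

-- B replaces A's manual run-length accumulator loop by splitting the bit string of the low bits on '0' (idiomatic).

-- ===== PORT A =====
def get_arrangement (layout : Int) : List Int :=
  let r := (PySem.List.pyRange 0 22 1).foldl
    (fun (st : Int × List Int) i =>            -- st = (cur_group, res)
      let cur_mask : Int := 2 ^ i.toNat        -- 2 ** _i  (_i from range(0, 22), so ≥ 0)
      let cur := PySem.Int.band layout cur_mask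
      if cur > 0 then (st.1 + 1, st.2)
      else if st.1 > 0 then (0, st.2 ++ [st.1])
      else st)
    (0, [])
  r.2

-- ===== PORT B =====
def get_arrangement_alt (layout : Int) : List Int :=
  let s : List Char := (PySem.List.pyRange 0 22 1).map
    (fun i => if PySem.Int.band layout (2 ^ i.toNat) > 0 then '1' else '0')
  ((PySem.List.slice (PySem.Chars.splitOn s ['0']) none (some (-1))).filter
      (fun p => !p.isEmpty)).map (fun p => (PySem.Chars.len p : Int))

-- ===== PRECONDITION & SPEC =====
def Spec_get_arrangement (layout : Int) (out : List Int) : Prop := out = get_arrangement_alt layout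
instance (layout : Int) (out : List Int) : Decidable (Spec_get_arrangement layout out) := by unfold Spec_get_arrangement; infer_instance

-- ===== CLAIM (what is proved, stated in full; the proofs are below) =====
def Claim_equal_get_arrangement : Prop := ∀ (layout : Int), Dom_get_arrangement layout → Spec_get_arrangement layout (get_arrangement layout)

-- ===== LEMMAS AND PROOFS =====

-- reference form of s.split('0') on a list of characters
def splitOn0 : List Char → List (List Char)
  | [] => [[]]
  | c :: rest => if c = '0' then [] :: splitOn0 rest else (splitOn0 rest).modifyHead (c :: ·)

lemma splitOn0_ne_nil (l : List Char) : splitOn0 l ≠ [] := by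
  induction l with
  | nil => simp [splitOn0]
  | cons c rest ih =>
    simp only [splitOn0]
    split_ifs
    · simp
    · cases h : splitOn0 rest with
      | nil => exact absurd h ih
      | cons p ps => simp [List.modifyHead]

lemma go_eq_splitOn0 (fuel : Nat) : ∀ (l cur : List Char) (acc : List (List Char)), l.length < fuel →
    PySem.Chars.splitOn.go ['0'] fuel l cur acc
      = acc.reverse ++ (splitOn0 l).modifyHead (cur.reverse ++ ·) := by
  induction fuel with
  | zero => intro l cur acc h; omega
  | succ f ih =>
    intro l cur acc h
    cases l with
    | nil => simp [PySem.Chars.splitOn.go, splitOn0]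
    | cons c rest =>
      rw [PySem.Chars.splitOn.go]
      by_cases hc : c = '0'
      · subst hc
        simp only [List.isPrefixOf, BEq.rfl, Bool.true_and, if_pos]
        rw [ih _ _ _ (by simpa using Nat.lt_of_succ_lt_succ h)]
        simp only [splitOn0, List.reverse_cons, List.reverse_nil, List.nil_append,
          List.modifyHead, List.append_assoc, List.singleton_append]
        cases hs : splitOn0 rest <;> simp [hs]
      · have hp : (['0'].isPrefixOf (c :: rest)) = false := by
          simp [List.isPrefixOf]; exact fun h' => absurd h'.symm hc
        rw [if_neg (by simp [hp])]
        rw [ih _ _ _ (by simpa using Nat.lt_of_succ_lt_succ h)]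
        cases hs : splitOn0 rest with
        | nil => exact absurd hs (splitOn0_ne_nil rest)
        | cons p ps =>
          simp [splitOn0, hc, hs, List.modifyHead]

lemma splitOn_eq_splitOn0 (s : List Char) : PySem.Chars.splitOn s ['0'] = splitOn0 s := by
  rw [PySem.Chars.splitOn, go_eq_splitOn0 _ _ _ _ (by omega)]
  cases hs : splitOn0 s <;> simp

-- A's loop body on the boolean "bit i of layout is set"
def stepA (st : Int × List Int) (b : Bool) : Int × List Int :=
  if b then (st.1 + 1, st.2)
  else if st.1 > 0 then (0, st.2 ++ [st.1])
  else st

-- lengths of the terminated runs of set bits, with g pending ones carried in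
def runs : List Bool → Int → List Int
  | [], _ => []
  | true :: t, g => runs t (g + 1)
  | false :: t, g => (if g > 0 then [g] else []) ++ runs t 0

lemma foldl_stepA (bs : List Bool) : ∀ (g : Int) (res : List Int), 0 ≤ g →
    (bs.foldl stepA (g, res)).2 = res ++ runs bs g := by
  induction bs with
  | nil => intro g res _; simp [runs]
  | cons b t ih =>
    intro g res hg
    cases b with
    | true =>
      simp only [List.foldl_cons, stepA, if_true, runs]
      exact ih (g + 1) res (by omega)
    | false =>
      simp only [List.foldl_cons, stepA, Bool.false_eq_true, if_neg (by simp : ¬False), runs]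
      by_cases hg0 : g > 0
      · rw [if_pos hg0, if_pos hg0, ih 0 _ le_rfl]; simp
      · have : g = 0 := by omega
        subst this
        rw [if_neg hg0, if_neg hg0, ih 0 _ le_rfl]; simp

def chr (b : Bool) : Char := if b then '1' else '0'

-- B's pipeline after the split, on the reference split
def pieceLens (cs : List Char) : List Int :=
  (((splitOn0 cs).dropLast).filter (fun p => !p.isEmpty)).map (fun p => (p.length : Int))

lemma splitOn0_replicate_one (n : Nat) : splitOn0 (List.replicate n '1') = [List.replicate n '1'] := by
  induction n with
  | zero => simp [splitOn0]
  | succ k ih => simp [List.replicate_succ, splitOn0, ih, List.modifyHead]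

lemma splitOn0_replicate_one_zero (n : Nat) (rest : List Char) :
    splitOn0 (List.replicate n '1' ++ '0' :: rest) = List.replicate n '1' :: splitOn0 rest := by
  induction n with
  | zero => simp [splitOn0]
  | succ k ih => simp [List.replicate_succ, splitOn0, ih, List.modifyHead]

lemma runs_eq_pieceLens (bs : List Bool) : ∀ g : Int, 0 ≤ g →
    runs bs g = pieceLens (List.replicate g.toNat '1' ++ bs.map chr) := by
  induction bs with
  | nil =>
    intro g hg
    simp [runs, pieceLens, splitOn0_replicate_one]
  | cons b t ih =>
    intro g hg
    cases b with
    | true =>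
      have h1 : List.replicate g.toNat '1' ++ List.map chr (true :: t)
          = List.replicate (g + 1).toNat '1' ++ List.map chr t := by
        have : (g + 1).toNat = g.toNat + 1 := by omega
        rw [this, List.replicate_succ']
        simp [chr]
      rw [runs, h1]
      exact ih (g + 1) (by omega)
    | false =>
      have h2 : List.replicate g.toNat '1' ++ List.map chr (false :: t)
          = List.replicate g.toNat '1' ++ '0' :: List.map chr t := by simp [chr]
      rw [runs, h2]
      unfold pieceLens
      rw [splitOn0_replicate_one_zero]
      rw [List.dropLast_cons_of_ne_nil (splitOn0_ne_nil _)]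
      rw [ih 0 le_rfl]
      by_cases hg0 : g > 0
      · have hne : List.replicate g.toNat '1' ≠ [] := by
          simp [List.replicate_eq_nil_iff]; omega
        rw [if_pos hg0]
        simp only [List.filter_cons, pieceLens]
        have hh : (!(List.replicate g.toNat '1').isEmpty) = true := by
          simp only [Bool.not_eq_eq_eq_not, Bool.not_true, List.isEmpty_eq_false_iff]
          exact hne
        rw [hh]
        simp only [if_true, List.map_cons, List.length_replicate]
        have hg' : ((g.toNat : Nat) : Int) = g := by omega
        rw [hg']
        rfl
      · have : g = 0 := by omega
        subst this
        simp [pieceLens]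

-- the 22 bit tests both programs are built from
def bitsOf (layout : Int) : List Bool :=
  (List.range 22).map (fun n => decide (0 < PySem.Int.band layout (2 ^ n)))

lemma A_eq_runs (layout : Int) : get_arrangement layout = runs (bitsOf layout) 0 := by
  unfold get_arrangement
  dsimp only
  rw [PySem.List.pyRange_one]
  have h22 : ((22 : Int) - 0).toNat = 22 := by decide
  rw [h22]
  rw [List.foldl_map]
  have hfun : (fun (st : Int × List Int) (k : Nat) =>
      (fun (st : Int × List Int) (i : Int) =>
        let cur_mask : Int := 2 ^ i.toNat
        let cur := PySem.Int.band layout cur_mask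
        if cur > 0 then (st.1 + 1, st.2)
        else if st.1 > 0 then (0, st.2 ++ [st.1])
        else st) st ((0 : Int) + (k : Int)))
      = fun st k => stepA st (decide (0 < PySem.Int.band layout (2 ^ k))) := by
    funext st k
    simp [stepA]
  rw [hfun]
  rw [show (fun (st : Int × List Int) (k : Nat) => stepA st (decide (0 < PySem.Int.band layout (2 ^ k))))
      = fun st k => stepA st ((fun n => decide (0 < PySem.Int.band layout (2 ^ n))) k) from rfl]
  rw [← List.foldl_map]
  exact foldl_stepA _ 0 [] le_rfl

lemma B_eq_pieceLens (layout : Int) : get_arrangement_alt layout = pieceLens ((bitsOf layout).map chr) := by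
  unfold get_arrangement_alt
  dsimp only
  rw [PySem.List.pyRange_one]
  have h22 : ((22 : Int) - 0).toNat = 22 := by decide
  rw [h22, List.map_map]
  have hs : ((fun (i : Int) => if PySem.Int.band layout (2 ^ i.toNat) > 0 then '1' else '0') ∘
      (fun (k : Nat) => (0 : Int) + (k : Int))) = fun k => chr (decide (0 < PySem.Int.band layout (2 ^ k))) := by
    funext k
    simp [chr]
  rw [hs]
  rw [splitOn_eq_splitOn0]
  rw [PySem.List.slice_to_neg_one]
  unfold pieceLens bitsOf
  rw [List.map_map]
  simp [PySem.Chars.len_eq, Function.comp_def]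

-- ===== VERDICT (by name: the statement is the Claim_ definition above) =====
theorem get_arrangement_spec : Claim_equal_get_arrangement := by
  intro layout _
  unfold Spec_get_arrangement
  rw [A_eq_runs, B_eq_pieceLens, runs_eq_pieceLens _ 0 le_rfl]
  simp
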